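-- pv_equiv track=rewrite | github.com/itayglisko/AdvancedCalculator | utility_functions.py | double_dot
-- ===== SOURCE A (Python) =====
-- def double_dot(lst: list[str]) -> bool:
--     """
--     checks if  there is a number that has more than 1 dot like: 1.4343.9
--     :param lst: list full of user's input
--     :return true or false:
--     """
--     str1 = ""
--     flag = False
--     for character in lst:
--         if character.isdigit() or character == '.':
--             str1 += character
--             if character == '.' and not flag:
--                 flag = True
--             elif flag and not character.isdigit():
--                 return False
--         else:
--             str1 = ""
--             flag = False
--     return True
-- ===== SOURCE B (Python) =====
-- def double_dot(lst: list[str]) -> bool: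
--     """
--     checks if there is a number that has more than 1 dot like: 1.4343.9
--     Re-implementation: partition the list into maximal runs of number-like
--     elements (element == '.' or element.isdigit()), then check every run
--     holds at most one '.' element.
--     """
--     groups = []
--     current = []
--     for ch in lst:
--         if ch == '.' or ch.isdigit():
--             current.append(ch)
--         else:
--             groups.append(current)
--             current = []
--     groups.append(current)
--     return all(group.count('.') <= 1 for group in groups)
-- ===== Notes on version B (the rewrite author's own statement) =====
-- stated objective: simpler
-- what changed: Replaces A's single stateful flag-and-accumulator scan (with early return) by a two-phase decomposition: one pass partitions the list into maximal runs of number-like elements, then a per-group dot count decides the answer.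
import Mathlib
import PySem

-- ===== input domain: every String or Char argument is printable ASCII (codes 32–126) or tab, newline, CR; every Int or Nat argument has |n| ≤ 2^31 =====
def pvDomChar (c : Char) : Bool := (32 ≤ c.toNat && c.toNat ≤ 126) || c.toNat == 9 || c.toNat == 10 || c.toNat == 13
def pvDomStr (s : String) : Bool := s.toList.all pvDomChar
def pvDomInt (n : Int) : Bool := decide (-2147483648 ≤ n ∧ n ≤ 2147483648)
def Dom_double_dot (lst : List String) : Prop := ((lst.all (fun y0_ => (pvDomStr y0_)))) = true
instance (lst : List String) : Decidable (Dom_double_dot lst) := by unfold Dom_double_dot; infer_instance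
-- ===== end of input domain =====

-- B replaces A's stateful flag scan by a grouping pass + per-group dot count (objective: simpler decomposition).

-- ===== PORT A =====
-- the for-loop of A: state (str1, flag), early return False
def ddLoopA : List String → String → Bool → Bool
  | [], _, _ => true
  | c :: rest, str1, flag =>
    if PySem.Str.strIsdigit c || c == "." then
      let str1' := str1 ++ c
      if c == "." && !flag then ddLoopA rest str1' true
      else if flag && !(PySem.Str.strIsdigit c) then false
      else ddLoopA rest str1' flag
    else ddLoopA rest "" false

def double_dot (lst : List String) : Bool := ddLoopA lst "" false

-- ===== PORT B =====
-- grouping pass: maximal runs of elements with (ch == '.' or ch.isdigit()); trailing run appended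
def ddGroups : List String → List String → List (List String)
  | [], current => [current]
  | c :: rest, current =>
    if c == "." || PySem.Str.strIsdigit c then ddGroups rest (current ++ [c])
    else current :: ddGroups rest []

def double_dot_alt (lst : List String) : Bool :=
  (ddGroups lst []).all (fun g => g.count "." ≤ 1)

-- ===== PRECONDITION & SPEC =====
def Spec_double_dot (lst : List String) (out : Bool) : Prop := out = double_dot_alt lst
instance (lst : List String) (out : Bool) : Decidable (Spec_double_dot lst out) := by unfold Spec_double_dot; infer_instance

-- ===== CLAIM (what is proved, stated in full; the proofs are below) =====
def Claim_equal_double_dot : Prop := ∀ (lst : List String), Dom_double_dot lst → Spec_double_dot lst (double_dot lst)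

-- ===== LEMMAS AND PROOFS =====

-- a run that already carries ≥ 2 dots poisons every grouping built from it
lemma ddGroups_bad (rest : List String) (cur : List String) (h2 : 2 ≤ cur.count ".") :
    (ddGroups rest cur).all (fun g => g.count "." ≤ 1) = false := by
  induction rest generalizing cur with
  | nil =>
    simp only [ddGroups, List.all_cons, List.all_nil, Bool.and_true, decide_eq_false_iff_not]
    omega
  | cons c rest ih =>
    simp only [ddGroups]
    split
    · exact ih (cur ++ [c]) (by simp only [List.count_append]; omega)
    · have hb : ¬ (cur.count "." ≤ 1) := by omega
      simp [hb]

-- invariant: A's flag mirrors whether the current run holds a dot, and the run is still clean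
lemma ddLoopA_eq (rest : List String) (str1 : String) (flag : Bool) (cur : List String)
    (hf : flag = decide (1 ≤ cur.count "."))
    (hc : cur.count "." ≤ 1) :
    ddLoopA rest str1 flag = (ddGroups rest cur).all (fun g => g.count "." ≤ 1) := by
  induction rest generalizing str1 flag cur with
  | nil => simp [ddLoopA, ddGroups, hc]
  | cons c rest ih =>
    simp only [ddLoopA, ddGroups]
    by_cases hd : PySem.Str.strIsdigit c
    · -- a digit element: c ≠ "." since "." is not a digit
      have hcne : c ≠ "." := fun h => by rw [h] at hd; exact absurd hd (by decide)
      have hne : (c == ".") = false := by simpa using hcne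
      have hcnt : (cur ++ [c]).count "." = cur.count "." := by
        simp [List.count_append, hcne]
      simp only [hd, hne, Bool.true_or, if_true, Bool.false_and, Bool.not_true,
        Bool.and_false, Bool.false_eq_true, if_false]
      exact ih _ flag (cur ++ [c]) (by rw [hcnt]; exact hf) (by omega)
    · by_cases he : c == "."
      · have hceq : c = "." := eq_of_beq he
        subst hceq
        have hcnt : (cur ++ ["."]).count "." = cur.count "." + 1 := by
          simp [List.count_append]
        cases hfv : flag with
        | false =>
          have h0 : cur.count "." = 0 := by
            rw [hfv] at hf
            have := of_decide_eq_false hf.symm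
            omega
          have hsd : PySem.Str.strIsdigit "." = false := by decide
          simp only [hsd, beq_self_eq_true, Bool.or_true, Bool.or_false, Bool.not_false,
            Bool.and_true, if_true]
          exact ih _ true (cur ++ ["."]) (by rw [hcnt, h0]; rfl) (by omega)
        | true =>
          have h1 : 1 ≤ cur.count "." := by
            rw [hfv] at hf; exact of_decide_eq_true hf.symm
          have hsd : PySem.Str.strIsdigit "." = false := by decide
          simp only [hsd, beq_self_eq_true, Bool.or_true, Bool.or_false, Bool.not_true,
            Bool.and_false, Bool.not_false, if_true, Bool.false_eq_true, if_false,
            Bool.and_self]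
          rw [ddGroups_bad rest (cur ++ ["."]) (by omega)]
      · -- separator: A resets, B emits the clean group
        have hd' : PySem.Str.strIsdigit c = false := Bool.eq_false_iff.mpr hd
        have he' : (c == ".") = false := Bool.eq_false_iff.mpr he
        rw [hd', he']
        simp only [Bool.or_self, Bool.false_eq_true, if_false]
        rw [ih _ false [] (by simp) (by simp)]
        simp [hc]

-- ===== VERDICT (by name: the statement is the Claim_ definition above) =====
theorem double_dot_spec : Claim_equal_double_dot := by
  intro lst _
  unfold Spec_double_dot double_dot double_dot_alt
  exact ddLoopA_eq lst "" false [] (by simp) (by simp)
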